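-- pv_equiv track=rewrite | github.com/ErikBoesen/YaleArtsVisualizer | backend/scraper.py | number_compress
-- ===== SOURCE A (Python) =====
-- base = 92
--
-- start_point = 34
--
-- def number_compress(number: int) -> str:
--     if number == 0:
--         return ''
--     digits = ''
--     while number:
--         digits += chr(number % base + start_point)
--         number //= base
--     return digits[::-1]
-- ===== SOURCE B (Python) =====
-- base = 92
--
-- start_point = 34
--
-- def number_compress(number: int) -> str:
--     # Recursive, most-significant digit first: no reversal needed.
--     if number == 0:
--         return ''
--     return number_compress(number // base) + chr(number % base + start_point)
-- ===== Notes on version B (the rewrite author's own statement) =====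
-- stated objective: simpler
-- what changed: Replaced the accumulate-then-reverse while loop by a direct recursion on the quotient that emits digits most-significant-first, eliminating the string reversal; Pre_ admits the nonnegative inputs (A's loop never returns on negatives).
import Mathlib
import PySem

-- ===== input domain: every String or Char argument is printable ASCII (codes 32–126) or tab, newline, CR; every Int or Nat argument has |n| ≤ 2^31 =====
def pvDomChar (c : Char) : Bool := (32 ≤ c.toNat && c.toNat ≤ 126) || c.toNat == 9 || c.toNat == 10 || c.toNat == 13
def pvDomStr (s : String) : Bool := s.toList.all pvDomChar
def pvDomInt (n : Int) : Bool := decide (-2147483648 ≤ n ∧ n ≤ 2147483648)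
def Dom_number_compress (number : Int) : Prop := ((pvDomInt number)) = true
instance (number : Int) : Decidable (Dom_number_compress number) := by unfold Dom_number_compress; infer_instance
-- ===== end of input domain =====

-- B replaces A's accumulate-then-reverse while loop by a direct recursion emitting
-- digits most-significant-first; equal on all nonnegative inputs (Pre_), where A returns.

-- chr(n) for n in 34..125 (printable ASCII digit range used here); exact on that range
def pvChr (n : Int) : Char := Char.ofNat n.toNat

theorem pv_floordiv_toNat_lt (n : Int) (h : 0 < n) :
    (PySem.Int.floordiv n 92).toNat < n.toNat := by
  rw [PySem.Int.floordiv_eq_ediv_of_pos (by omega)]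
  omega

-- ===== PORT A =====
-- the `while number:` loop; digits accumulated least-significant-first.
-- For number < 0 Python loops forever (excluded by Pre_); this port stops there.
def pvLoopA (number : Int) (digits : List Char) : List Char :=
  if _h : number ≤ 0 then digits
  else pvLoopA (PySem.Int.floordiv number 92)
      (digits ++ [pvChr (PySem.Int.mod number 92 + 34)])
termination_by number.toNat
decreasing_by exact pv_floordiv_toNat_lt number (by omega)

def number_compress (number : Int) : String :=
  if number = 0 then ""
  else String.ofList ((pvLoopA number []).reverse)   -- digits[::-1]

-- ===== PORT B =====
-- B's recursion: number_compress(number // base) + chr(number % base + start_point).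
-- For number < 0 Python B raises RecursionError (excluded by Pre_); this port stops there.
def number_compress_alt (number : Int) : String :=
  if _h : number ≤ 0 then ""
  else number_compress_alt (PySem.Int.floordiv number 92) ++
      String.ofList [pvChr (PySem.Int.mod number 92 + 34)]
termination_by number.toNat
decreasing_by exact pv_floordiv_toNat_lt number (by omega)

-- ===== PRECONDITION & SPEC =====
-- Pre_ excludes numbers < 0: there A's while loop never terminates (Python A returns on no negative input).
def Pre_number_compress (number : Int) : Prop := 0 ≤ number
instance (number : Int) : Decidable (Pre_number_compress number) := by unfold Pre_number_compress; infer_instance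
def pvWitness_number_compress : Int := (12345)

def Spec_number_compress (number : Int) (out : String) : Prop := out = number_compress_alt number
instance (number : Int) (out : String) : Decidable (Spec_number_compress number out) := by unfold Spec_number_compress; infer_instance

-- ===== CLAIM (what is proved, stated in full; the proofs are below) =====
def Claim_equal_number_compress : Prop := ∀ (number : Int), Dom_number_compress number → Pre_number_compress number → Spec_number_compress number (number_compress number)

-- ===== LEMMAS AND PROOFS =====

theorem pvLoopA_prefix (k : Nat) :
    ∀ (m : Int), m.toNat ≤ k → ∀ (d : List Char), ∃ t, pvLoopA m d = d ++ t := by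
  induction k with
  | zero =>
    intro m hk d
    rw [pvLoopA, dif_pos (by omega)]
    exact ⟨[], by simp⟩
  | succ k ih =>
    intro m hk d
    rw [pvLoopA]
    by_cases hm : m ≤ 0
    · rw [dif_pos hm]; exact ⟨[], by simp⟩
    · rw [dif_neg hm]
      have hlt := pv_floordiv_toNat_lt m (by omega)
      obtain ⟨t, ht⟩ := ih (PySem.Int.floordiv m 92) (by omega)
        (d ++ [pvChr (PySem.Int.mod m 92 + 34)])
      exact ⟨pvChr (PySem.Int.mod m 92 + 34) :: t, by rw [ht]; simp⟩

theorem alt_toList_eq_rev_loop (k : Nat) :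
    ∀ (n : Int), n.toNat ≤ k → 0 < n →
      ∀ (d : List Char),
        (number_compress_alt n).toList = ((pvLoopA n d).drop d.length).reverse := by
  induction k with
  | zero => intro n hk hn; omega
  | succ k ih =>
    intro n hk hn d
    rw [number_compress_alt, pvLoopA]
    rw [dif_neg (by omega : ¬ n ≤ 0), dif_neg (by omega : ¬ n ≤ 0)]
    by_cases hq : PySem.Int.floordiv n 92 ≤ 0
    · have hq0 : PySem.Int.floordiv n 92 = 0 := by
        have h1 : 0 ≤ PySem.Int.floordiv n 92 := by
          rw [PySem.Int.floordiv_eq_ediv_of_pos (by omega)]; omega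
        omega
      rw [hq0, number_compress_alt, pvLoopA, dif_pos (le_refl 0), dif_pos (le_refl 0)]
      simp [String.toList_ofList]
    · have hlt := pv_floordiv_toNat_lt n hn
      rw [String.toList_append, String.toList_ofList,
        ih (PySem.Int.floordiv n 92) (by omega) (by omega)
            (d ++ [pvChr (PySem.Int.mod n 92 + 34)])]
      obtain ⟨t, ht⟩ := pvLoopA_prefix (PySem.Int.floordiv n 92).toNat
        (PySem.Int.floordiv n 92) (le_refl _) (d ++ [pvChr (PySem.Int.mod n 92 + 34)])
      rw [ht]
      simp

theorem number_compress_eq (n : Int) (h : 0 ≤ n) :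
    number_compress n = number_compress_alt n := by
  rcases eq_or_lt_of_le h with h0 | hpos
  · rw [number_compress, number_compress_alt]
    simp [← h0]
  · rw [number_compress]
    rw [if_neg (by omega)]
    have := alt_toList_eq_rev_loop n.toNat n (le_refl _) hpos []
    simp at this
    rw [← this, String.ofList_toList]

-- ===== VERDICT (by name: the statement is the Claim_ definition above) =====
theorem number_compress_spec : Claim_equal_number_compress := by
  intro n _ hpre
  exact number_compress_eq n hpre
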